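-- pv_equiv track=rewrite | github.com/dplocki/advent-of-code | 2020/2020_20.py | all_possible_edges
-- ===== SOURCE A (Python) =====
-- def edge_to_number(tile, point):
--     return int(''.join(['1' if p in tile else '0' for p in point]), 2)
--
-- def all_possible_edges(tile):
--     n = edge_to_number(tile, ((i, 0) for i in range(10)))
--     e = edge_to_number(tile, ((9, i) for i in range(10)))
--     s = edge_to_number(tile, ((i, 9) for i in range(10)))
--     w = edge_to_number(tile, ((0, i) for i in range(10)))
--
--     rn = edge_to_number(tile, ((9 - i, 0) for i in range(10)))
--     re = edge_to_number(tile, ((9, 9 - i) for i in range(10)))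
--     rs = edge_to_number(tile, ((9 - i, 9) for i in range(10)))
--     rw = edge_to_number(tile, ((0, 9 - i) for i in range(10)))
--
--     return (n, e, s, w, rn, re, rs, rw)
-- ===== SOURCE B (Python) =====
-- def _edge_num(tile, points):
--     v = 0
--     for p in points:
--         v = v * 2 + (1 if p in tile else 0)
--     return v
--
--
-- def _rev10(x):
--     r = 0
--     for _ in range(10):
--         r = r * 2 + (x & 1)
--         x >>= 1
--     return r
--
--
-- def all_possible_edges(tile):
--     n = _edge_num(tile, ((i, 0) for i in range(10)))
--     e = _edge_num(tile, ((9, i) for i in range(10)))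
--     s = _edge_num(tile, ((i, 9) for i in range(10)))
--     w = _edge_num(tile, ((0, i) for i in range(10)))
--     return (n, e, s, w, _rev10(n), _rev10(e), _rev10(s), _rev10(w))
-- ===== Notes on version B (the rewrite author's own statement) =====
-- stated objective: alternative
-- what changed: B scans the tile only for the four forward edges and derives each reversed edge as a pure 10-bit integer bit reversal of its forward counterpart, replacing four of A's eight tile scans and all of A's string building/parsing with integer arithmetic.
import Mathlib
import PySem

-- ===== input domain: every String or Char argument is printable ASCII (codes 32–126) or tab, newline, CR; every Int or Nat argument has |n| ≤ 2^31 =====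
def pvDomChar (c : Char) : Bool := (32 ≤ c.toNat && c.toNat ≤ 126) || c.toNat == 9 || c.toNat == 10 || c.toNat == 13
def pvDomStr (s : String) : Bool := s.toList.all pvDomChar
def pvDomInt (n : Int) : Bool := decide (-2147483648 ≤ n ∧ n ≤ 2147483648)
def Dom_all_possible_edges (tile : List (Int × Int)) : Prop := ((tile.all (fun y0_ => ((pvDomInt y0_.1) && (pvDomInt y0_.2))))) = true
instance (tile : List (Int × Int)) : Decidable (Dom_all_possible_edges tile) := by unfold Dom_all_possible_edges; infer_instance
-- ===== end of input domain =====

-- B computes only the four forward edges and derives each reversed edge by a 10-bit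
-- integer bit reversal, replacing four of A's eight tile scans (objective: alternative).

-- ===== PORT A =====
-- int(''.join(['1' if p in tile else '0' for p in point]), 2): the joined string
-- consists only of '0'/'1', so the left-to-right base-2 fold is exact here.
def edgeToNumber (tile : List (Int × Int)) (point : List (Int × Int)) : Int :=
  ((point.map (fun p => if p ∈ tile then '1' else '0')).foldl
    (fun acc c => acc * 2 + (if c = '1' then 1 else 0)) 0)

def all_possible_edges (tile : List (Int × Int)) : Int × Int × Int × Int × Int × Int × Int × Int :=
  let n := edgeToNumber tile ((PySem.List.pyRange 0 10 1).map (fun i => (i, 0)))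
  let e := edgeToNumber tile ((PySem.List.pyRange 0 10 1).map (fun i => ((9 : Int), i)))
  let s := edgeToNumber tile ((PySem.List.pyRange 0 10 1).map (fun i => (i, (9 : Int))))
  let w := edgeToNumber tile ((PySem.List.pyRange 0 10 1).map (fun i => ((0 : Int), i)))
  let rn := edgeToNumber tile ((PySem.List.pyRange 0 10 1).map (fun i => (9 - i, (0 : Int))))
  let re := edgeToNumber tile ((PySem.List.pyRange 0 10 1).map (fun i => ((9 : Int), 9 - i)))
  let rs := edgeToNumber tile ((PySem.List.pyRange 0 10 1).map (fun i => (9 - i, (9 : Int))))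
  let rw := edgeToNumber tile ((PySem.List.pyRange 0 10 1).map (fun i => ((0 : Int), 9 - i)))
  (n, e, s, w, rn, re, rs, rw)

-- ===== PORT B =====
def edgeNumAlt (tile : List (Int × Int)) (points : List (Int × Int)) : Int :=
  points.foldl (fun v p => v * 2 + (if p ∈ tile then 1 else 0)) 0

-- x & 1 = x % 2 and x >> 1 = x // 2 in Python for every int (floor semantics), exact.
def rev10 (x : Int) : Int :=
  ((PySem.List.pyRange 0 10 1).foldl
    (fun (st : Int × Int) _ => (st.1 * 2 + PySem.Int.mod st.2 2, PySem.Int.floordiv st.2 2))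
    (0, x)).1

def all_possible_edges_alt (tile : List (Int × Int)) : Int × Int × Int × Int × Int × Int × Int × Int :=
  let n := edgeNumAlt tile ((PySem.List.pyRange 0 10 1).map (fun i => (i, 0)))
  let e := edgeNumAlt tile ((PySem.List.pyRange 0 10 1).map (fun i => ((9 : Int), i)))
  let s := edgeNumAlt tile ((PySem.List.pyRange 0 10 1).map (fun i => (i, (9 : Int))))
  let w := edgeNumAlt tile ((PySem.List.pyRange 0 10 1).map (fun i => ((0 : Int), i)))
  (n, e, s, w, rev10 n, rev10 e, rev10 s, rev10 w)

-- ===== PRECONDITION & SPEC =====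
def Spec_all_possible_edges (tile : List (Int × Int)) (out : Int × Int × Int × Int × Int × Int × Int × Int) : Prop := out = all_possible_edges_alt tile
instance (tile : List (Int × Int)) (out : Int × Int × Int × Int × Int × Int × Int × Int) : Decidable (Spec_all_possible_edges tile out) := by
  unfold Spec_all_possible_edges
  letI h5 : DecidableEq (Int × Int × Int × Int × Int) := instDecidableEqProd
  letI h6 : DecidableEq (Int × Int × Int × Int × Int × Int) := instDecidableEqProd
  letI h7 : DecidableEq (Int × Int × Int × Int × Int × Int × Int) := instDecidableEqProd
  exact instDecidableEqProd _ _

-- ===== CLAIM (what is proved, stated in full; the proofs are below) =====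
def Claim_equal_all_possible_edges : Prop := ∀ (tile : List (Int × Int)), Dom_all_possible_edges tile → Spec_all_possible_edges tile (all_possible_edges tile)

-- ===== LEMMAS AND PROOFS =====

theorem pyR10 : PySem.List.pyRange 0 10 1 = [0, 1, 2, 3, 4, 5, 6, 7, 8, 9] := by decide

theorem edgeToNumber_eq_alt (tile point : List (Int × Int)) :
    edgeToNumber tile point = edgeNumAlt tile point := by
  simp [edgeToNumber, edgeNumAlt, List.foldl_map]

-- recursion underlying rev10's loop
def revAux : Nat → Int → Int → Int
  | 0, r, _ => r
  | n + 1, r, x => revAux n (r * 2 + PySem.Int.mod x 2) (PySem.Int.floordiv x 2)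

theorem foldl_rev_step (l : List Int) : ∀ (r x : Int),
    (l.foldl (fun (st : Int × Int) _ =>
        (st.1 * 2 + PySem.Int.mod st.2 2, PySem.Int.floordiv st.2 2)) (r, x)).1
      = revAux l.length r x := by
  induction l with
  | nil => intro r x; simp [revAux]
  | cons a l ih => intro r x; simpa [revAux] using ih _ _

theorem mod_two_bit (v c : Int) (hc : c = 0 ∨ c = 1) :
    PySem.Int.mod (v * 2 + c) 2 = c := by
  rw [PySem.Int.mod_eq_emod_of_pos (show (0:Int) < 2 by norm_num)]
  rcases hc with h | h <;> subst h <;> omega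

theorem fdiv_two_bit (v c : Int) (hc : c = 0 ∨ c = 1) :
    PySem.Int.floordiv (v * 2 + c) 2 = v := by
  rw [PySem.Int.floordiv_eq_ediv_of_pos (show (0:Int) < 2 by norm_num)]
  rcases hc with h | h <;> subst h <;> omega

theorem revAux_foldl (tile : List (Int × Int)) (pts : List (Int × Int)) : ∀ (r : Int),
    revAux pts.length r
        (pts.foldl (fun v p => v * 2 + (if p ∈ tile then 1 else 0)) 0)
      = pts.reverse.foldl (fun v p => v * 2 + (if p ∈ tile then 1 else 0)) r := by
  induction pts using List.reverseRecOn with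
  | nil => intro r; simp [revAux]
  | append_singleton cs p ih =>
      intro r
      have hc : (if p ∈ tile then (1 : Int) else 0) = 0 ∨
          (if p ∈ tile then (1 : Int) else 0) = 1 := by
        by_cases h : p ∈ tile <;> simp [h]
      simp only [List.foldl_append, List.foldl_cons, List.foldl_nil,
        List.length_append, List.length_cons, List.length_nil, List.reverse_append,
        List.reverse_cons, List.reverse_nil, List.nil_append, List.cons_append]
      rw [show cs.length + 0 + 1 = cs.length + 1 from rfl]
      rw [revAux, mod_two_bit _ _ hc, fdiv_two_bit _ _ hc]
      exact ih _

theorem rev10_edge (tile : List (Int × Int)) (pts : List (Int × Int))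
    (hlen : pts.length = 10) :
    rev10 (edgeNumAlt tile pts) = edgeNumAlt tile pts.reverse := by
  simp only [rev10, edgeNumAlt, foldl_rev_step]
  rw [show (PySem.List.pyRange 0 10 1).length = 10 from by decide, ← hlen]
  exact revAux_foldl tile pts 0

-- ===== VERDICT (by name: the statement is the Claim_ definition above) =====
theorem all_possible_edges_spec : Claim_equal_all_possible_edges := by
  intro tile _
  show _ = _
  simp only [all_possible_edges, all_possible_edges_alt, edgeToNumber_eq_alt]
  refine Prod.ext rfl (Prod.ext rfl (Prod.ext rfl (Prod.ext rfl ?_)))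
  have h : ∀ f : Int → Int × Int,
      ((PySem.List.pyRange 0 10 1).map f).length = 10 := by
    intro f; rw [pyR10]; rfl
  rw [rev10_edge tile _ (h _), rev10_edge tile _ (h _), rev10_edge tile _ (h _),
    rev10_edge tile _ (h _)]
  rw [pyR10]
  norm_num
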